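-- pv_equiv track=rewrite | github.com/TYLERSFOSTER/Discrete-Signal-Tonality | src/dissig/utils/arithmetic.py | unit_clusters
-- ===== SOURCE A (Python) =====
-- import math
--
-- def all_divisors(modulus : int) -> list[int]:
--     """
--     Compute all positive divisors of a given positive integer modulus.
--
--     Args:
--         modulus (int): A positive integer.
--
--     Returns:
--         list[int]: A sorted list of all positive divisors of modulus.
--     """
--     assert isinstance(modulus, int)
--     assert modulus > 0, "Input must be a positive integer"
--
--     result = set()
--
--     for i in range(1, int(modulus**0.5) + 1):
--         if modulus % i == 0:
--             result.add(i)
--             result.add(modulus // i)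
--
--     sorted_list = sorted(result)
--
--     return sorted_list
--
-- def multiplicative_units(modulus : int) -> list[int]:
--     """
--     Compute the multiplicative units in the ring Z/modulusZ.
--
--     Args:
--         modulus (int): A positive integer.
--
--     Returns:
--         list[int]: A list of integers in {0, ..., modulus-1} that are coprime to modulus.
--     """
--     assert isinstance(modulus, int)
--
--     unit_list = [idx for idx in range(modulus) if math.gcd(idx, modulus) == 1]
--
--     return unit_list
--
-- def unit_clusters(modulus : int) -> dict[str, list[int]]:
--     """
--     Compute clusters in Z/modulusZ formed by multiplying base cluster, consisting of
--     units (Z/modulusZ)^× in Z/modulusZ by every divisor of modulus.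
--
--     Args:
--         modulus (int): A positive integer.
--
--     Returns:
--         dict[str, list[int]]: A dictionary mapping 'cluster_d' to the sorted list
--             of residues {(d * u) mod modulus | u in (Z/modulusZ)^×}, for each divisor d of modulus.
--     """
--     assert isinstance(modulus, int)
--     assert modulus >= 1
--
--     ring_units = multiplicative_units(modulus)
--
--     clusters = {}
--     for divisor in all_divisors(modulus):
--         new_cluster = [(divisor * idx)%modulus for idx in ring_units]
--         new_cluster = list(set(new_cluster))
--         new_cluster = sorted(new_cluster)
--
--         cluster_label = f"cluster_{divisor}"
--         clusters[cluster_label] = new_cluster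
--
--     return clusters
-- ===== SOURCE B (Python) =====
-- import math
--
-- def unit_clusters(modulus: int) -> dict[str, list[int]]:
--     assert isinstance(modulus, int)
--     assert modulus >= 1
--
--     buckets: dict[int, list[int]] = {}
--     for x in range(modulus):
--         buckets.setdefault(math.gcd(x, modulus), []).append(x)
--
--     return {f"cluster_{d}": buckets[d] for d in sorted(buckets)}
-- ===== Notes on version B (the rewrite author's own statement) =====
-- stated objective: faster
-- what changed: Instead of enumerating divisors and, for each divisor d, mapping d over the unit group, deduplicating and sorting (O(d(n)*n log n)), B makes one pass over range(n) bucketing each x by gcd(x, n) - the bucket of d is exactly the sorted cluster {x : gcd(x,n)=d} and the bucket keys are exactly the divisors.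
import Mathlib
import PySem

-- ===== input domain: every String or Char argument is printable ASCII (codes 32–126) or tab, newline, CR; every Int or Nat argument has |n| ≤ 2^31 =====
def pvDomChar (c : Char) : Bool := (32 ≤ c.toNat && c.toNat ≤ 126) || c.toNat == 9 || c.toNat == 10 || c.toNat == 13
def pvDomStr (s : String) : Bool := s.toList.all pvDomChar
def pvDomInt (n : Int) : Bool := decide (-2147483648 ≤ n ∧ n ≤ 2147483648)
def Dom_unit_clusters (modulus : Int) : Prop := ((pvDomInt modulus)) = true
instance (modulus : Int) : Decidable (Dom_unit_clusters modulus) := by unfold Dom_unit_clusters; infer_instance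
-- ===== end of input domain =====

-- B replaces A's per-divisor pass over the unit group (map, dedup, sort) by one pass over range(n)
-- bucketing each x by gcd(x, n); proved equal on every modulus ≥ 1 (outside Pre_ both Pythons raise AssertionError).

-- ===== PORT A =====
-- int(modulus**0.5) is ported as Int.sqrt modulus: exact, since for 0 ≤ modulus ≤ 2^31 (the stated
-- domain) the correctly-rounded double sqrt truncates to the integer square root.
def all_divisors (modulus : Int) : List Int :=
  let result : List Int :=
    (PySem.List.pyRange 1 (Int.sqrt modulus + 1) 1).foldl
      (fun s i => if PySem.Int.mod modulus i == 0
                  then PySem.Set.add (PySem.Set.add s i) (PySem.Int.floordiv modulus i)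
                  else s) ([] : List Int)
  let sorted_list : List Int := PySem.List.sorted result (fun x => x)
  sorted_list

def multiplicative_units (modulus : Int) : List Int :=
  (PySem.List.pyRange 0 modulus 1).filter (fun idx => ((Int.gcd idx modulus : Int) == 1))

def unit_clusters (modulus : Int) : List (String × List Int) :=
  let ring_units : List Int := multiplicative_units modulus
  let clusters : PySem.Dict String (List Int) :=
    (all_divisors modulus).foldl
      (fun cl divisor =>
        cl.insert ("cluster_" ++ PySem.Int.toStr divisor)
          (PySem.List.sorted
            (PySem.Set.ofList (ring_units.map (fun idx => PySem.Int.mod (divisor * idx) modulus)))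
            (fun x => x)))
      PySem.Dict.empty
  clusters.items

-- ===== PORT B =====
def unit_clusters_alt (modulus : Int) : List (String × List Int) :=
  let buckets : PySem.Dict Int (List Int) :=
    (PySem.List.pyRange 0 modulus 1).foldl
      (fun d x => d.modify ((Int.gcd x modulus : Int)) [] (fun l => l ++ [x]))
      PySem.Dict.empty
  (PySem.List.sorted buckets.keys (fun x => x)).map
    (fun d => ("cluster_" ++ PySem.Int.toStr d, buckets.getD d []))

-- ===== PRECONDITION & SPEC =====
-- Pre_ excludes modulus < 1, where both A and B raise AssertionError (assert modulus >= 1).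
def Pre_unit_clusters (modulus : Int) : Prop := 1 ≤ modulus
instance (modulus : Int) : Decidable (Pre_unit_clusters modulus) := by unfold Pre_unit_clusters; infer_instance
def pvWitness_unit_clusters : Int := (12)

def Spec_unit_clusters (modulus : Int) (out : List (String × List Int)) : Prop := out = unit_clusters_alt modulus
instance (modulus : Int) (out : List (String × List Int)) : Decidable (Spec_unit_clusters modulus out) := by unfold Spec_unit_clusters; infer_instance

-- ===== CLAIM (what is proved, stated in full; the proofs are below) =====
def Claim_equal_unit_clusters : Prop := ∀ (modulus : Int), Dom_unit_clusters modulus → Pre_unit_clusters modulus → Spec_unit_clusters modulus (unit_clusters modulus)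

-- ===== LEMMAS AND PROOFS =====

-- The strictly increasing list of positive divisors of n: the canonical form both sides reduce to.
def pvDivList (n : Int) : List Int :=
  (PySem.List.pyRange 1 (n+1) 1).filter (fun d => decide (d ∣ n))

-- The strictly increasing list of x ∈ [0, n) with gcd(x, n) = d.
def pvClusterList (n d : Int) : List Int :=
  (PySem.List.pyRange 0 n 1).filter (fun x => ((Int.gcd x n : Int) == d))

-- The canonical value both ports are proved equal to.
def pvCanon (n : Int) : List (String × List Int) :=
  (pvDivList n).map (fun d => ("cluster_" ++ PySem.Int.toStr d, pvClusterList n d))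

theorem pvDivList_pairwise (n : Int) : (pvDivList n).Pairwise (· < ·) :=
  (PySem.List.pairwise_lt_pyRange_one 1 (n+1)).filter _

theorem pvDivList_nodup (n : Int) : (pvDivList n).Nodup :=
  (PySem.List.nodup_pyRange_one 1 (n+1)).filter _

theorem mem_pvDivList (n : Int) (hn : 1 ≤ n) (d : Int) :
    d ∈ pvDivList n ↔ 1 ≤ d ∧ d ∣ n := by
  unfold pvDivList
  simp only [List.mem_filter, PySem.List.mem_pyRange_one, decide_eq_true_eq]
  constructor
  · rintro ⟨⟨h1, _⟩, h2⟩; exact ⟨h1, h2⟩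
  · rintro ⟨h1, h2⟩
    exact ⟨⟨h1, by have := Int.le_of_dvd (by omega) h2; omega⟩, h2⟩

theorem pvClusterList_pairwise (n d : Int) : (pvClusterList n d).Pairwise (· < ·) :=
  (PySem.List.pairwise_lt_pyRange_one 0 n).filter _

theorem pvClusterList_nodup (n d : Int) : (pvClusterList n d).Nodup :=
  (PySem.List.nodup_pyRange_one 0 n).filter _

theorem mem_pvClusterList (n d x : Int) :
    x ∈ pvClusterList n d ↔ 0 ≤ x ∧ x < n ∧ (Int.gcd x n : Int) = d := by
  unfold pvClusterList
  simp only [List.mem_filter, PySem.List.mem_pyRange_one, beq_iff_eq]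
  tauto

-- membership in A's divisor-collecting fold
theorem mem_div_fold (n : Int) (l : List Int) (acc : List Int) (x : Int) :
    x ∈ l.foldl
      (fun s i => if PySem.Int.mod n i == 0
                  then PySem.Set.add (PySem.Set.add s i) (PySem.Int.floordiv n i)
                  else s) acc ↔
    x ∈ acc ∨ ∃ i ∈ l, i ∣ n ∧ (x = i ∨ x = PySem.Int.floordiv n i) := by
  induction l generalizing acc with
  | nil => simp
  | cons a l ih =>
    simp only [List.foldl_cons, List.mem_cons, ih]
    by_cases h : a ∣ n
    · have : PySem.Int.mod n a == 0 := by
        simp [(PySem.Int.mod_eq_zero_iff_dvd n a).mpr h]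
      rw [if_pos this]
      simp only [PySem.Set.mem_add]
      constructor
      · rintro (((hx | hx) | hx) | ⟨i, hi, hdvd, hx⟩)
        · exact Or.inl hx
        · exact Or.inr ⟨a, Or.inl rfl, h, Or.inl hx⟩
        · exact Or.inr ⟨a, Or.inl rfl, h, Or.inr hx⟩
        · exact Or.inr ⟨i, Or.inr hi, hdvd, hx⟩
      · rintro (hx | ⟨i, (rfl | hi), hdvd, hx⟩)
        · exact Or.inl (Or.inl (Or.inl hx))
        · rcases hx with hx | hx
          · exact Or.inl (Or.inl (Or.inr hx))
          · exact Or.inl (Or.inr hx)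
        · exact Or.inr ⟨i, hi, hdvd, hx⟩
    · have : ¬ (PySem.Int.mod n a == 0) := by
        simp [(PySem.Int.mod_eq_zero_iff_dvd n a)]
        exact fun hc => absurd hc h
      rw [if_neg this]
      constructor
      · rintro (hx | ⟨i, hi, hdvd, hx⟩)
        · exact Or.inl hx
        · exact Or.inr ⟨i, Or.inr hi, hdvd, hx⟩
      · rintro (hx | ⟨i, (rfl | hi), hdvd, hx⟩)
        · exact Or.inl hx
        · exact absurd hdvd h
        · exact Or.inr ⟨i, hi, hdvd, hx⟩

theorem nodup_div_fold (n : Int) (l : List Int) (acc : List Int) (h : acc.Nodup) :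
    (l.foldl
      (fun s i => if PySem.Int.mod n i == 0
                  then PySem.Set.add (PySem.Set.add s i) (PySem.Int.floordiv n i)
                  else s) acc).Nodup := by
  induction l generalizing acc with
  | nil => exact h
  | cons a l ih =>
    simp only [List.foldl_cons]
    split
    · exact ih _ (PySem.Set.nodup_add _ _ (PySem.Set.nodup_add _ _ h))
    · exact ih _ h

-- the sqrt pairing argument, Nat level
theorem div_pair_nat (N : ℕ) (hN : 1 ≤ N) (X : ℕ) (h1 : 1 ≤ X) (h2 : X ∣ N) :
    ∃ i : ℕ, 1 ≤ i ∧ i ≤ Nat.sqrt N ∧ i ∣ N ∧ (X = i ∨ X = N / i) := by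
  by_cases h : X ≤ Nat.sqrt N
  · exact ⟨X, h1, h, h2, Or.inl rfl⟩
  · obtain ⟨M, hM⟩ := h2
    have hX0 : 0 < X := h1
    have hM0 : 0 < M := by
      rcases Nat.eq_zero_or_pos M with rfl | h0
      · simp at hM; omega
      · exact h0
    have hsq : N < X * X := by
      have := (Nat.sqrt_lt').mp (by omega : Nat.sqrt N < X)
      nlinarith [this]
    have hMX : M < X := by nlinarith
    refine ⟨M, hM0, ?_, ⟨X, by rw [hM, Nat.mul_comm]⟩, Or.inr ?_⟩
    · rw [Nat.le_sqrt]
      nlinarith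
    · rw [hM, Nat.mul_div_cancel _ hM0]

-- characterisation of what A's divisor fold collects
theorem div_fold_char (n : Int) (hn : 1 ≤ n) (x : Int) :
    (∃ i, 1 ≤ i ∧ i < Int.sqrt n + 1 ∧ i ∣ n ∧ (x = i ∨ x = PySem.Int.floordiv n i)) ↔
    (1 ≤ x ∧ x ∣ n) := by
  constructor
  · rintro ⟨i, hi1, hi2, hdvd, rfl | rfl⟩
    · exact ⟨hi1, hdvd⟩
    · rw [PySem.Int.floordiv_eq_ediv_of_pos (by omega)]
      obtain ⟨k, rfl⟩ := hdvd
      rw [Int.mul_ediv_cancel_left _ (by omega)]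
      refine ⟨by nlinarith, ⟨i, mul_comm i k⟩⟩
  · rintro ⟨hx1, hdvd⟩
    have hxn : x = ((x.toNat : ℕ) : ℤ) := (Int.toNat_of_nonneg (by omega)).symm
    have hnn : n = ((n.toNat : ℕ) : ℤ) := (Int.toNat_of_nonneg (by omega)).symm
    have hdN : x.toNat ∣ n.toNat := by
      rw [← Int.natCast_dvd_natCast, ← hxn, ← hnn]; exact hdvd
    obtain ⟨i, hi1, hi2, hi3, hi4⟩ := div_pair_nat n.toNat (by omega) x.toNat (by omega) hdN
    refine ⟨(i : ℤ), by exact_mod_cast hi1, ?_, ?_, ?_⟩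
    · have : Int.sqrt n = ((Nat.sqrt n.toNat : ℕ) : ℤ) := rfl
      rw [this]; exact_mod_cast Nat.lt_succ_of_le hi2
    · rw [hnn]; exact_mod_cast hi3
    · rcases hi4 with h | h
      · left; rw [hxn]; exact_mod_cast h
      · right
        rw [PySem.Int.floordiv_eq_ediv_of_pos (by exact_mod_cast hi1), hxn, hnn, ← Int.natCast_ediv]
        exact_mod_cast h

-- lifting a unit of Z/M to a unit of Z/N for M ∣ N
theorem lift_unit (N M : ℕ) (hN : 0 < N) (hMN : M ∣ N) (m : ℕ) (hm : m < M)
    (h : Nat.Coprime m M) : ∃ u : ℕ, u < N ∧ Nat.Coprime u N ∧ u % M = m := by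
  haveI : NeZero N := ⟨hN.ne'⟩
  haveI : NeZero M := ⟨by omega⟩
  obtain ⟨U, hU⟩ := ZMod.unitsMap_surjective hMN (ZMod.unitOfCoprime m h)
  refine ⟨((U : ZMod N)).val, ZMod.val_lt _, ZMod.val_coe_unit_coprime U, ?_⟩
  have h1 : ((ZMod.unitsMap hMN U : ZMod M)) = ((m : ℕ) : ZMod M) := by
    rw [hU, ZMod.coe_unitOfCoprime]
  have h2 : ((ZMod.unitsMap hMN U : ZMod M)) = (((U : ZMod N).val : ℕ) : ZMod M) := by
    simp [ZMod.unitsMap, ZMod.castHom_apply, ZMod.natCast_val]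
  have h3 := congrArg ZMod.val (h2.symm.trans h1)
  rwa [ZMod.val_natCast, ZMod.val_natCast, Nat.mod_eq_of_lt hm] at h3

-- the cluster of divisor d is exactly {x < N : gcd(x, N) = d}, Nat level
theorem cluster_char_nat (N d : ℕ) (hN : 1 ≤ N) (hd1 : 1 ≤ d) (hd : d ∣ N) (x : ℕ) :
    (∃ u, u < N ∧ Nat.gcd u N = 1 ∧ x = d * u % N) ↔ (x < N ∧ Nat.gcd x N = d) := by
  obtain ⟨M, hM⟩ := hd
  have hM0 : 0 < M := by
    rcases Nat.eq_zero_or_pos M with rfl | h0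
    · simp at hM; omega
    · exact h0
  have hMdvd : M ∣ N := ⟨d, by rw [hM, mul_comm]⟩
  constructor
  · rintro ⟨u, hu1, hu2, rfl⟩
    refine ⟨Nat.mod_lt _ (by omega), ?_⟩
    have e1 : Nat.gcd (d * u % N) N = Nat.gcd N (d * u) := (Nat.gcd_rec N (d * u)).symm
    rw [e1, Nat.gcd_comm, hM, Nat.gcd_mul_left]
    have hc : Nat.Coprime u M := Nat.Coprime.coprime_dvd_right hMdvd hu2
    rw [Nat.Coprime.gcd_eq_one hc, mul_one]
  · rintro ⟨hx1, hx2⟩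
    have hdx : d ∣ x := hx2 ▸ Nat.gcd_dvd_left x N
    obtain ⟨m, rfl⟩ := hdx
    have hgcd : d * Nat.gcd m M = d := by
      rw [← Nat.gcd_mul_left, ← hM, hx2]
    have hcop : Nat.Coprime m M := Nat.eq_of_mul_eq_mul_left (show 0 < d by omega)
      (show d * Nat.gcd m M = d * 1 by rw [hgcd, mul_one])
    have hmM : m < M := by
      rw [hM] at hx1
      exact lt_of_mul_lt_mul_left hx1 (Nat.zero_le d)
    obtain ⟨u, hu1, hu2, hu3⟩ := lift_unit N M (by omega) hMdvd m hmM hcop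
    refine ⟨u, hu1, hu2, ?_⟩
    rw [hM, Nat.mul_mod_mul_left, hu3]

-- same, Int level, phrased on A's loop values
theorem cluster_char_int (n : Int) (hn : 1 ≤ n) (d : Int) (hd1 : 1 ≤ d) (hd : d ∣ n) (x : Int) :
    (∃ u, (0 ≤ u ∧ u < n) ∧ (Int.gcd u n : Int) = 1 ∧ x = PySem.Int.mod (d * u) n) ↔
    (0 ≤ x ∧ x < n ∧ (Int.gcd x n : Int) = d) := by
  obtain ⟨N, rfl⟩ : ∃ N : ℕ, n = (N : ℤ) := ⟨n.toNat, (Int.toNat_of_nonneg (by omega)).symm⟩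
  obtain ⟨D, rfl⟩ : ∃ D : ℕ, d = (D : ℤ) := ⟨d.toNat, (Int.toNat_of_nonneg (by omega)).symm⟩
  have hdN : D ∣ N := by exact_mod_cast hd
  constructor
  · rintro ⟨u, ⟨hu0, hun⟩, hg, rfl⟩
    obtain ⟨U, rfl⟩ : ∃ U : ℕ, u = (U : ℤ) := ⟨u.toNat, (Int.toNat_of_nonneg hu0).symm⟩
    have hg' : Nat.gcd U N = 1 := by
      rw [Int.gcd_natCast_natCast] at hg; exact_mod_cast hg
    have key := (cluster_char_nat N D (by omega) (by omega) hdN ((D * U) % N)).mp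
      ⟨U, by omega, hg', rfl⟩
    have hx : PySem.Int.mod ((D : ℤ) * (U : ℤ)) (N : ℤ) = (((D * U) % N : ℕ) : ℤ) := by
      rw [PySem.Int.mod_eq_emod_of_pos (by omega)]
      push_cast
      rfl
    rw [hx, Int.gcd_natCast_natCast]
    refine ⟨by positivity, by exact_mod_cast key.1, by exact_mod_cast key.2⟩
  · rintro ⟨hx0, hxn, hg⟩
    obtain ⟨X, rfl⟩ : ∃ X : ℕ, x = (X : ℤ) := ⟨x.toNat, (Int.toNat_of_nonneg hx0).symm⟩
    have hg' : Nat.gcd X N = D := by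
      rw [Int.gcd_natCast_natCast] at hg; exact_mod_cast hg
    obtain ⟨u, hu1, hu2, hu3⟩ := (cluster_char_nat N D (by omega) (by omega) hdN X).mpr
      ⟨by exact_mod_cast hxn, hg'⟩
    refine ⟨(u : ℤ), ⟨by positivity, by exact_mod_cast hu1⟩, ?_, ?_⟩
    · rw [Int.gcd_natCast_natCast, hu2]; rfl
    · rw [PySem.Int.mod_eq_emod_of_pos (by omega)]
      rw [hu3]
      push_cast
      rfl

-- the gcd values occurring on [0, n) are exactly the positive divisors of n
theorem gcd_mem_char (n : Int) (hn : 1 ≤ n) (g : Int) :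
    (∃ x, (0 ≤ x ∧ x < n) ∧ (Int.gcd x n : Int) = g) ↔ (1 ≤ g ∧ g ∣ n) := by
  constructor
  · rintro ⟨x, ⟨hx0, hxn⟩, rfl⟩
    refine ⟨?_, Int.gcd_dvd_right x n⟩
    have hne : Int.gcd x n ≠ 0 := by
      intro hc
      rw [Int.gcd_eq_zero_iff] at hc
      omega
    omega
  · rintro ⟨hg1, hgd⟩
    by_cases h : g = n
    · subst h
      refine ⟨0, ⟨le_refl 0, by omega⟩, ?_⟩
      rw [Int.gcd_zero_left]
      omega
    · have hgn : g < n := by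
        have := Int.le_of_dvd (by omega) hgd
        omega
      refine ⟨g, ⟨by omega, hgn⟩, ?_⟩
      have : Int.gcd g n = g.natAbs := Nat.gcd_eq_left (Int.natAbs_dvd_natAbs.mpr hgd)
      rw [this]
      omega

-- str(n) is injective
theorem pvDigitChar_toNat (m : ℕ) (h : m < 10) : (Nat.digitChar m).toNat - 48 = m := by
  interval_cases m <;> rfl

theorem pvDecode_toDigits (n : ℕ) :
    (Nat.toDigits 10 n).foldl (fun a c => a * 10 + (c.toNat - 48)) 0 = n := by
  induction n using Nat.strong_induction_on with
  | _ n ih =>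
    rw [Nat.toDigits_eq_if (by norm_num)]
    split
    · next h => simp [pvDigitChar_toNat n h]
    · next h =>
      rw [List.foldl_append]
      have := ih (n / 10) (by omega)
      simp [this, pvDigitChar_toNat (n % 10) (by omega)]
      omega

theorem toDigits_inj (a b : ℕ) (h : Nat.toDigits 10 a = Nat.toDigits 10 b) : a = b := by
  have := pvDecode_toDigits a
  rw [h, pvDecode_toDigits b] at this
  omega

theorem toDigits_no_minus (n : ℕ) : '-' ∉ Nat.toDigits 10 n := by
  intro hmem
  have := Nat.isDigit_of_mem_toDigits (by norm_num) (by norm_num) hmem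
  simp [Char.isDigit] at this

theorem toStr_injective : Function.Injective PySem.Int.toStr := by
  intro a b h
  unfold PySem.Int.toStr at h
  have h' : PySem.Int.toChars a = PySem.Int.toChars b := by
    have := congrArg String.toList h
    rwa [String.toList_ofList, String.toList_ofList] at this
  unfold PySem.Int.toChars at h'
  split at h' <;> split at h'
  · next ha hb =>
    simp only [List.cons.injEq] at h'
    have := toDigits_inj _ _ h'.2
    omega
  · next ha hb =>
    exfalso
    exact toDigits_no_minus b.toNat (h' ▸ List.mem_cons_self ..)
  · next ha hb =>
    exfalso
    exact toDigits_no_minus a.toNat (h'.symm ▸ List.mem_cons_self ..)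
  · next ha hb =>
    have := toDigits_inj _ _ h'
    omega

theorem label_injective : Function.Injective (fun d : Int => "cluster_" ++ PySem.Int.toStr d) := by
  intro d d' h
  apply toStr_injective
  have := congrArg String.toList h
  simp only [String.toList_append] at this
  exact String.toList_inj.mp (List.append_cancel_left this)

theorem all_divisors_eq (n : Int) (hn : 1 ≤ n) : all_divisors n = pvDivList n := by
  unfold all_divisors
  apply PySem.List.sorted_eq_of_perm_of_pairwise_lt _ _ _ ?_ (pvDivList_pairwise n)
  rw [List.perm_ext_iff_of_nodup (pvDivList_nodup n) (nodup_div_fold n _ _ List.nodup_nil)]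
  intro a
  rw [mem_pvDivList n hn a, mem_div_fold]
  rw [← div_fold_char n hn a]
  simp only [List.not_mem_nil, false_or, PySem.List.mem_pyRange_one]
  constructor
  · rintro ⟨i, h1, h2, h3, h4⟩; exact ⟨i, ⟨h1, h2⟩, h3, h4⟩
  · rintro ⟨i, ⟨h1, h2⟩, h3, h4⟩; exact ⟨i, h1, h2, h3, h4⟩

theorem clusterA_eq (n : Int) (hn : 1 ≤ n) (d : Int) (hd1 : 1 ≤ d) (hd : d ∣ n) :
    PySem.List.sorted
      (PySem.Set.ofList ((multiplicative_units n).map (fun idx => PySem.Int.mod (d * idx) n)))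
      (fun x => x) = pvClusterList n d := by
  apply PySem.List.sorted_eq_of_perm_of_pairwise_lt _ _ _ ?_ (pvClusterList_pairwise n d)
  rw [List.perm_ext_iff_of_nodup (pvClusterList_nodup n d) (PySem.Set.nodup_ofList _)]
  intro y
  rw [mem_pvClusterList, PySem.Set.mem_ofList, List.mem_map,
    ← cluster_char_int n hn d hd1 hd y]
  unfold multiplicative_units
  simp only [List.mem_filter, PySem.List.mem_pyRange_one, beq_iff_eq]
  tauto

-- A's port equals the canonical form
theorem A_eq_canon (n : Int) (hn : 1 ≤ n) : unit_clusters n = pvCanon n := by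
  unfold unit_clusters pvCanon
  simp only []
  rw [all_divisors_eq n hn]
  rw [PySem.Dict.items_foldl_insert_fresh (pvDivList n)
        (fun d => "cluster_" ++ PySem.Int.toStr d) _ PySem.Dict.empty
        (fun a _ => PySem.Dict.contains_empty _)
        (List.Nodup.map label_injective (pvDivList_nodup n))]
  rw [show (PySem.Dict.empty : PySem.Dict String (List Int)).items = [] from rfl,
    List.nil_append]
  apply List.map_congr_left
  intro d hd
  rw [mem_pvDivList n hn d] at hd
  rw [clusterA_eq n hn d hd.1 hd.2]

theorem bucket_getD (n c : Int) :
    ((PySem.List.pyRange 0 n 1).foldl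
      (fun d x => d.modify ((Int.gcd x n : Int)) [] (fun l => l ++ [x]))
      PySem.Dict.empty).getD c [] = pvClusterList n c := by
  rw [show ((PySem.List.pyRange 0 n 1).foldl
        (fun d x => d.modify ((Int.gcd x n : Int)) [] (fun l => l ++ [x]))
        PySem.Dict.empty) =
      (((PySem.List.pyRange 0 n 1).map (fun x => ((Int.gcd x n : Int), x))).foldl
        (fun d p => d.modify p.1 [] (fun l => l ++ [p.2]))
        PySem.Dict.empty) by rw [List.foldl_map]]
  rw [PySem.Dict.getD_foldl_modify_append, PySem.Dict.getD_empty, List.nil_append,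
    List.filter_map, List.map_map]
  simp [Function.comp_def, pvClusterList]

theorem bucket_keys (n : Int) (hn : 1 ≤ n) :
    PySem.List.sorted
      (((PySem.List.pyRange 0 n 1).foldl
        (fun d x => d.modify ((Int.gcd x n : Int)) [] (fun l => l ++ [x]))
        PySem.Dict.empty).keys)
      (fun x => x) = pvDivList n := by
  rw [PySem.Dict.keys_foldl_modify_key, PySem.Dict.keys_empty,
    show PySem.Set.update ([] : List Int) ((PySem.List.pyRange 0 n 1).map
        (fun x => ((Int.gcd x n : Int)))) =
      PySem.Set.ofList ((PySem.List.pyRange 0 n 1).map (fun x => ((Int.gcd x n : Int)))) by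
      rw [PySem.Set.ofList_eq_foldl]; rfl]
  apply PySem.List.sorted_eq_of_perm_of_pairwise_lt _ _ _ ?_ (pvDivList_pairwise n)
  rw [List.perm_ext_iff_of_nodup (pvDivList_nodup n) (PySem.Set.nodup_ofList _)]
  intro g
  rw [mem_pvDivList n hn g, PySem.Set.mem_ofList, List.mem_map,
    ← gcd_mem_char n hn g]
  simp only [PySem.List.mem_pyRange_one]

-- B's port equals the canonical form
theorem B_eq_canon (n : Int) (hn : 1 ≤ n) : unit_clusters_alt n = pvCanon n := by
  unfold unit_clusters_alt pvCanon
  simp only []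
  rw [bucket_keys n hn]
  apply List.map_congr_left
  intro d _
  rw [bucket_getD n d]

-- ===== VERDICT (by name: the statement is the Claim_ definition above) =====
theorem unit_clusters_spec : Claim_equal_unit_clusters := by
  intro n _ hn
  unfold Spec_unit_clusters
  rw [A_eq_canon n hn, B_eq_canon n hn]
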